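-- pv_equiv track=rewrite | github.com/danvk/ohm | geojson_to_osm.py | split_ring_at_junctions
-- ===== SOURCE A (Python) =====
-- def split_ring_at_junctions(
--     ring: list[int], junctions: set[int]
-- ) -> list[tuple[int, ...]]:
--     """Split a ring (open sequence of node IDs) into maximal segments.
--
--     A segment starts and ends at a junction node.  If no junctions are
--     present in the ring the whole ring becomes one segment (closed: first
--     node is repeated at the end).
--
--     Returns a list of tuples of node IDs.  Each tuple has its start and end
--     in ``junctions`` (or the ring is entirely non-junction and the single
--     segment is closed).
--     """
--     junction_indices = [i for i, nid in enumerate(ring) if nid in junctions]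
--
--     if not junction_indices:
--         # No junctions – entire ring is one segment.  Rotate to the minimum
--         # node ID so that two traversals of the same closed ring (starting at
--         # different positions) produce the same canonical segment and are
--         # deduplicated correctly (e.g. an island shared between two features).
--         min_idx = ring.index(min(ring))
--         rotated = ring[min_idx:] + ring[:min_idx]
--         return [tuple(rotated) + (rotated[0],)]
--
--     segments: list[tuple[int, ...]] = []
--     num_j = len(junction_indices)
--
--     for k in range(num_j):
--         start_idx = junction_indices[k]
--         end_idx = junction_indices[(k + 1) % num_j]
--
--         if end_idx > start_idx:
--             seg = ring[start_idx : end_idx + 1]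
--         else:
--             # wrap around
--             seg = ring[start_idx:] + ring[: end_idx + 1]
--
--         segments.append(tuple(seg))
--
--     return segments
-- ===== SOURCE B (Python) =====
-- def split_ring_at_junctions(ring, junctions):
--     """Streaming re-implementation: rotate to the first junction, then one
--     pass accumulating nodes; emit a segment each time a junction is reached."""
--     first = next((i for i, nid in enumerate(ring) if nid in junctions), None)
--     if first is None:
--         # No junctions: identical canonical closed segment (rotate to min).
--         min_idx = ring.index(min(ring))
--         rotated = ring[min_idx:] + ring[:min_idx]
--         return [tuple(rotated) + (rotated[0],)]
--     rotated = ring[first:] + ring[:first]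
--     segments = []
--     current = [rotated[0]]
--     for nid in rotated[1:]:
--         current.append(nid)
--         if nid in junctions:
--             segments.append(tuple(current))
--             current = [nid]
--     current.append(rotated[0])
--     segments.append(tuple(current))
--     return segments
-- ===== Notes on version B (the rewrite author's own statement) =====
-- stated objective: alternative
-- what changed: Replaces the index-pair loop (enumerate all junction indices, then slice ring[start:end+1] for each consecutive index pair with modular wrap-around) by a single streaming pass: rotate the ring to its first junction and accumulate nodes, emitting a segment each time a junction is reached and closing the last one with the rotation start.
import Mathlib
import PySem

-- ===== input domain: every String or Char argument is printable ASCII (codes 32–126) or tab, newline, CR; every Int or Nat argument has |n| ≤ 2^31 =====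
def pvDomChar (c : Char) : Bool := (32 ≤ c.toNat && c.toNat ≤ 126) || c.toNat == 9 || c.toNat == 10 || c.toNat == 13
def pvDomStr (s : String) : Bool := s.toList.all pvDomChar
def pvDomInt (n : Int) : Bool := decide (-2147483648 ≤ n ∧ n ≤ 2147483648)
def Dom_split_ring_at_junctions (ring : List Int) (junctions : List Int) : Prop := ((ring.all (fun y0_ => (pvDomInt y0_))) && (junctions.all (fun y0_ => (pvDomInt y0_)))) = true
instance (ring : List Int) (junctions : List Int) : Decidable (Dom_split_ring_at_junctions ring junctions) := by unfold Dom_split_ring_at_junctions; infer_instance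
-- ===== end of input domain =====

-- B replaces A's index-pair slicing loop by one streaming pass over the ring rotated
-- to its first junction (objective: alternative decomposition, same cost).

-- ===== PORT A =====
def split_ring_at_junctions (ring : List Int) (junctions : List Int) : List (List Int) :=
  let junction_indices : List Int :=
    ((PySem.List.enumerate ring 0).filter (fun p => junctions.contains p.2)).map (fun p => p.1)
  if junction_indices.isEmpty then
    let mn : Int := (PySem.List.min? ring (fun x => x)).getD 0
    let min_idx : Nat := (PySem.List.index? ring mn).getD 0
    let rotated := PySem.List.slice ring (some (min_idx : Int)) none ++
                   PySem.List.slice ring none (some (min_idx : Int))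
    [rotated ++ [PySem.List.pyGetD rotated 0 0]]
  else
    let num_j := junction_indices.length
    (PySem.List.pyRange 0 (num_j : Int) 1).foldl (fun segs k =>
      let start_idx := PySem.List.pyGetD junction_indices k 0
      let end_idx := PySem.List.pyGetD junction_indices (PySem.Int.mod (k + 1) (num_j : Int)) 0
      let seg := if start_idx < end_idx
        then PySem.List.slice ring (some start_idx) (some (end_idx + 1))
        else PySem.List.slice ring (some start_idx) none ++
             PySem.List.slice ring none (some (end_idx + 1))
      segs ++ [seg]) []

-- ===== PORT B =====
def split_ring_at_junctions_alt (ring : List Int) (junctions : List Int) : List (List Int) :=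
  match List.findIdx? (fun nid => junctions.contains nid) ring with
  | none =>
    let mn : Int := (PySem.List.min? ring (fun x => x)).getD 0
    let min_idx : Nat := (PySem.List.index? ring mn).getD 0
    let rotated := PySem.List.slice ring (some (min_idx : Int)) none ++
                   PySem.List.slice ring none (some (min_idx : Int))
    [rotated ++ [PySem.List.pyGetD rotated 0 0]]
  | some first =>
    let rotated := PySem.List.slice ring (some (first : Int)) none ++
                   PySem.List.slice ring none (some (first : Int))
    let h0 := PySem.List.pyGetD rotated 0 0
    let r := (PySem.List.slice rotated (some 1) none).foldl
      (fun (p : List (List Int) × List Int) nid =>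
        let cur := p.2 ++ [nid]
        if junctions.contains nid then (p.1 ++ [cur], [nid]) else (p.1, cur))
      ([], [h0])
    r.1 ++ [r.2 ++ [h0]]

-- ===== PRECONDITION & SPEC =====
-- Pre_ excludes only the empty ring, on which Python A raises ValueError (min of empty sequence).
def Pre_split_ring_at_junctions (ring : List Int) (junctions : List Int) : Prop := ring ≠ []
instance (ring : List Int) (junctions : List Int) : Decidable (Pre_split_ring_at_junctions ring junctions) := by unfold Pre_split_ring_at_junctions; infer_instance
def pvWitness_split_ring_at_junctions : List Int × List Int := ([1, 2, 3, 4], [2, 4])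

def Spec_split_ring_at_junctions (ring : List Int) (junctions : List Int) (out : List (List Int)) : Prop := out = split_ring_at_junctions_alt ring junctions
instance (ring : List Int) (junctions : List Int) (out : List (List Int)) : Decidable (Spec_split_ring_at_junctions ring junctions out) := by unfold Spec_split_ring_at_junctions; infer_instance

-- ===== CLAIM (what is proved, stated in full; the proofs are below) =====
def Claim_equal_split_ring_at_junctions : Prop := ∀ (ring : List Int) (junctions : List Int), Dom_split_ring_at_junctions ring junctions → Pre_split_ring_at_junctions ring junctions → Spec_split_ring_at_junctions ring junctions (split_ring_at_junctions ring junctions)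

-- ===== LEMMAS AND PROOFS =====

-- B's streaming loop, as a structural recursion: accumulate until a junction, emit, reseed.
def pvGo (J : List Int) : List Int → List Int → Int → List (List Int)
  | [], acc, c => [acc ++ [c]]
  | x :: xs, acc, c =>
    if J.contains x then (acc ++ [x]) :: pvGo J xs [x] c else pvGo J xs (acc ++ [x]) c

-- the (Nat) positions of junction elements, scanning from offset s
def pvIdxs (J : List Int) : List Int → Nat → List Nat
  | [], _ => []
  | x :: xs, s => if J.contains x then s :: pvIdxs J xs (s + 1) else pvIdxs J xs (s + 1)

-- A's segment list, recursively over the junction positions (i0 = first junction position)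
def pvAForm (ring : List Int) (i0 : Nat) : List Nat → List (List Int)
  | [] => []
  | [a] => [ring.drop a ++ ring.take (i0 + 1)]
  | a :: b :: js => (ring.drop a).take (b + 1 - a) :: pvAForm ring i0 (b :: js)

theorem pvGo_prefix (J : List Int) (p : List Int) :
    ∀ ys acc c, (∀ x ∈ p, J.contains x = false) →
      pvGo J (p ++ ys) acc c = pvGo J ys (acc ++ p) c := by
  induction p with
  | nil => intro ys acc c _; simp
  | cons x p ih =>
    intro ys acc c h
    have hx := h x (by simp)
    simp only [List.cons_append, pvGo, hx, Bool.false_eq_true, if_false]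
    rw [ih ys (acc ++ [x]) c (fun y hy => h y (by simp [hy]))]
    simp

theorem pvGo_nojunc (J xs acc : List Int) (c : Int)
    (h : ∀ x ∈ xs, J.contains x = false) : pvGo J xs acc c = [acc ++ xs ++ [c]] := by
  have := pvGo_prefix J xs [] acc c h
  simpa [pvGo] using this

theorem pvFoldB (J : List Int) (xs : List Int) :
    ∀ segs acc c,
      (let r := xs.foldl (fun (p : List (List Int) × List Int) nid =>
          let cur := p.2 ++ [nid]
          if J.contains nid then (p.1 ++ [cur], [nid]) else (p.1, cur)) (segs, acc)
       r.1 ++ [r.2 ++ [c]]) = segs ++ pvGo J xs acc c := by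
  induction xs with
  | nil => intro segs acc c; simp [pvGo]
  | cons x xs ih =>
    intro segs acc c
    by_cases hx : J.contains x
    · simp only [List.foldl_cons, pvGo, hx, if_true]
      have := ih (segs ++ [acc ++ [x]]) [x] c
      simpa using this
    · simp only [List.foldl_cons, pvGo, hx, Bool.false_eq_true, if_false]
      exact ih segs (acc ++ [x]) c

theorem pvJi_eq_idxs (J : List Int) (xs : List Int) :
    ∀ s : Nat, ((PySem.List.enumerate xs (s : Int)).filter (fun p => J.contains p.2)).map
        (fun p => p.1) = (pvIdxs J xs s).map (fun i => Int.ofNat i) := by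
  induction xs with
  | nil => intro s; simp [PySem.List.enumerate_nil, pvIdxs]
  | cons x xs ih =>
    intro s
    have hc : ((s : Int) + 1) = ((s + 1 : Nat) : Int) := by push_cast; ring
    rw [PySem.List.enumerate_cons, hc]
    by_cases hx : J.contains x
    · rw [List.filter_cons_of_pos (by simpa using hx), List.map_cons, ih (s + 1)]
      rw [pvIdxs, if_pos hx, List.map_cons]
      rfl
    · rw [List.filter_cons_of_neg (by simpa using hx), ih (s + 1)]
      rw [pvIdxs, if_neg hx]

theorem pvIdxs_nil (J xs : List Int) (s : Nat) (h : pvIdxs J xs s = []) :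
    ∀ x ∈ xs, J.contains x = false := by
  induction xs generalizing s with
  | nil => simp
  | cons y ys ih =>
    by_cases hy : J.contains y
    · rw [pvIdxs, if_pos hy] at h
      exact absurd h (by simp)
    · simp only [pvIdxs, hy, Bool.false_eq_true, if_false] at h
      intro x hx
      rcases List.mem_cons.1 hx with rfl | hx
      · exact eq_false_of_ne_true hy
      · exact ih (s + 1) h x hx

theorem pvIdxs_decomp (J : List Int) (xs : List Int) :
    ∀ s a js, pvIdxs J xs s = a :: js →
      ∃ p y q, xs = p ++ y :: q ∧ (∀ x ∈ p, J.contains x = false) ∧ J.contains y = true ∧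
        p.length + s = a ∧ pvIdxs J q (a + 1) = js := by
  induction xs with
  | nil => intro s a js h; simp [pvIdxs] at h
  | cons x xs ih =>
    intro s a js h
    by_cases hx : J.contains x
    · rw [pvIdxs, if_pos hx] at h
      injection h with h1 h2
      subst h1
      exact ⟨[], x, xs, by simp, by simp, hx, by simp, h2⟩
    · rw [pvIdxs, if_neg hx] at h
      obtain ⟨p, y, q, hxs, hp, hy, hlen, hq⟩ := ih (s + 1) a js h
      refine ⟨x :: p, y, q, by simp [hxs], ?_, hy, by simp; omega, hq⟩
      intro z hz
      rcases List.mem_cons.1 hz with rfl | hz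
      · exact eq_false_of_ne_true hx
      · exact hp z hz

theorem pvIdxs_bounds (J : List Int) (xs : List Int) :
    ∀ s, ∀ a ∈ pvIdxs J xs s, s ≤ a ∧ a < s + xs.length := by
  induction xs with
  | nil => intro s a ha; simp [pvIdxs] at ha
  | cons x xs ih =>
    intro s a ha
    by_cases hx : J.contains x
    · rw [pvIdxs, if_pos hx] at ha
      rcases List.mem_cons.1 ha with rfl | ha
      · simp
      · have := ih (s + 1) a ha
        simp at this ⊢
        omega
    · rw [pvIdxs, if_neg hx] at ha
      have := ih (s + 1) a ha
      simp at this ⊢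
      omega

theorem pvIdxs_sorted (J : List Int) (xs : List Int) :
    ∀ s, (pvIdxs J xs s).Pairwise (· < ·) := by
  induction xs with
  | nil => intro s; simp [pvIdxs]
  | cons x xs ih =>
    intro s
    by_cases hx : J.contains x
    · rw [pvIdxs, if_pos hx]
      refine List.pairwise_cons.2 ⟨?_, ih (s + 1)⟩
      intro a ha
      have := (pvIdxs_bounds J xs (s + 1) a ha).1
      omega
    · rw [pvIdxs, if_neg hx]
      exact ih (s + 1)

theorem pvIdxs_head (J : List Int) (xs : List Int) :
    ∀ s, (pvIdxs J xs s).head? =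
      (List.findIdx? (fun x => J.contains x) xs).map (· + s) := by
  induction xs with
  | nil => intro s; simp [pvIdxs]
  | cons x xs ih =>
    intro s
    by_cases hx : J.contains x
    · rw [pvIdxs, if_pos hx]
      have hx' : x ∈ J := by simpa using hx
      simp [List.findIdx?_cons, hx']
    · rw [pvIdxs, if_neg hx, ih (s + 1)]
      rw [List.findIdx?_cons, if_neg hx]
      cases hfi : List.findIdx? (fun x => J.contains x) xs <;>
        simp [hfi, Function.comp] <;> omega

theorem pvMain (J ring : List Int) (i0 : Nat) (hi0 : i0 < ring.length)
    (hpre : ∀ x ∈ ring.take i0, J.contains x = false) :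
    ∀ js q a, a < ring.length → J.contains (ring.getD a 0) = true →
      ring.drop (a + 1) = q → pvIdxs J q (a + 1) = js →
      pvGo J (q ++ ring.take i0) [ring.getD a 0] (ring.getD i0 0) =
        pvAForm ring i0 (a :: js) := by
  intro js
  induction js with
  | nil =>
    intro q a ha hJ hq hidx
    have hqn : ∀ x ∈ q, J.contains x = false := pvIdxs_nil J q (a + 1) hidx
    have hnot : ∀ x ∈ q ++ ring.take i0, J.contains x = false := by
      intro x hx
      rcases List.mem_append.1 hx with h | h
      · exact hqn x h
      · exact hpre x h
    rw [pvGo_nojunc J _ _ _ hnot]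
    have hdrop : ring.drop a = ring.getD a 0 :: q := by
      rw [List.drop_eq_getElem_cons ha, hq, List.getD_eq_getElem ring 0 ha]
    have htake : ring.take (i0 + 1) = ring.take i0 ++ [ring.getD i0 0] := by
      rw [List.take_add_one, List.getElem?_eq_getElem hi0, List.getD_eq_getElem ring 0 hi0]
      rfl
    simp [pvAForm, hdrop, htake]
  | cons b js' ih =>
    intro q a ha hJ hq hidx
    obtain ⟨p, y, q', hq2, hp, hy, hlen, hq'⟩ := pvIdxs_decomp J q (a + 1) b js' hidx
    have hql : q.length = ring.length - (a + 1) := by rw [← hq]; simp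
    have hpl : p.length < q.length := by rw [hq2]; simp
    have hbn : b < ring.length := by omega
    have hdropb : ring.drop b = y :: q' := by
      have h1 : ring.drop b = List.drop p.length q := by
        rw [← hq, List.drop_drop]
        congr 1
        omega
      rw [h1, hq2, List.drop_left]
    have h2 := List.drop_eq_getElem_cons hbn
    rw [hdropb] at h2
    obtain ⟨hyy, hqq⟩ := List.cons_eq_cons.mp h2
    rw [← List.getD_eq_getElem ring 0 hbn] at hyy
    subst hyy
    have hq'b : ring.drop (b + 1) = q' := hqq.symm
    have hassoc : (p ++ ring.getD b 0 :: q') ++ ring.take i0 =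
        p ++ (ring.getD b 0 :: (q' ++ ring.take i0)) := by simp
    rw [hq2, hassoc, pvGo_prefix J p _ _ _ hp, pvGo, if_pos hy]
    have hseg : ([ring.getD a 0] ++ p) ++ [ring.getD b 0] = (ring.drop a).take (b + 1 - a) := by
      have hdropa : ring.drop a = ring.getD a 0 :: q := by
        rw [List.drop_eq_getElem_cons ha, hq, List.getD_eq_getElem ring 0 ha]
      rw [hdropa, hq2]
      have hba : b + 1 - a = (p.length + 1) + 1 := by omega
      rw [hba, List.take_succ_cons]
      simp [List.take_append]
    have htail := ih q' b hbn hy hq'b hq'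
    rw [pvAForm, ← hseg, htail]

theorem pvAForm_length (ring : List Int) (i0 : Nat) (js : List Nat) (h : js ≠ []) :
    (pvAForm ring i0 js).length = js.length := by
  revert h
  induction js with
  | nil => simp
  | cons a js ih =>
    intro _
    cases js with
    | nil => simp [pvAForm]
    | cons b js' => simp [pvAForm, ih (by simp)]

theorem pvAForm_getElem (ring : List Int) (i0 : Nat) :
    ∀ js k (h : k < js.length) (hh : js ≠ []),
      (pvAForm ring i0 js)[k]'(by rw [pvAForm_length ring i0 js hh]; exact h) =
        if hlt : k + 1 < js.length then
          (ring.drop js[k]).take (js[k + 1]'hlt + 1 - js[k])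
        else ring.drop js[k] ++ ring.take (i0 + 1) := by
  intro js
  induction js with
  | nil => intro k h hh; simp at h
  | cons a js ih =>
    intro k h hh
    cases js with
    | nil =>
      have hk : k = 0 := by simpa using h
      subst hk
      rw [dif_neg (by simp)]
      simp [pvAForm]
    | cons b js' =>
      cases k with
      | zero =>
        rw [dif_pos (by simp)]
        simp [pvAForm]
      | succ k =>
        have h' : k < (b :: js').length := by simpa using h
        have hstep := ih k h' (by simp)
        have hL : (pvAForm ring i0 (a :: b :: js'))[k + 1]'(by
            rw [pvAForm_length ring i0 _ hh]; exact h) =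
            (pvAForm ring i0 (b :: js'))[k]'(by
            rw [pvAForm_length ring i0 _ (by simp)]; exact h') := by
          simp [pvAForm]
        rw [hL, hstep]
        by_cases hlt : k + 1 < (b :: js').length
        · rw [dif_pos hlt, dif_pos (by simpa using hlt)]
          simp
        · rw [dif_neg hlt, dif_neg (by simpa using hlt)]
          simp

theorem split_ring_spec_aux (ring : List Int) (junctions : List Int) (h : ring ≠ []) :
    split_ring_at_junctions ring junctions = split_ring_at_junctions_alt ring junctions := by
  have hji := pvJi_eq_idxs junctions ring 0
  have hhead := pvIdxs_head junctions ring 0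
  cases hjn : pvIdxs junctions ring 0 with
  | nil =>
    rw [hjn] at hji hhead
    have hfi : List.findIdx? (fun x => junctions.contains x) ring = none := by
      cases hfi2 : List.findIdx? (fun x => junctions.contains x) ring with
      | none => rfl
      | some j => rw [hfi2] at hhead; simp at hhead
    unfold split_ring_at_junctions split_ring_at_junctions_alt
    rw [hfi]
    simp only [Nat.cast_zero] at hji
    rw [hji]
    rfl
  | cons i0 rest =>
    rw [hjn] at hji hhead
    have hfi : List.findIdx? (fun x => junctions.contains x) ring = some i0 := by
      cases hfi2 : List.findIdx? (fun x => junctions.contains x) ring with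
      | none => rw [hfi2] at hhead; simp at hhead
      | some j => rw [hfi2] at hhead; simp at hhead; simp [hhead]
    have hsort := pvIdxs_sorted junctions ring 0
    rw [hjn] at hsort
    have hbound : ∀ a ∈ (i0 :: rest), a < ring.length := by
      intro a ha
      have := (pvIdxs_bounds junctions ring 0 a (hjn ▸ ha)).2
      omega
    obtain ⟨p, y, q, hq2, hp, hy, hlen, hqidx⟩ := pvIdxs_decomp junctions ring 0 i0 rest hjn
    have hi0 : i0 < ring.length := hbound i0 (by simp)
    have hplen : p.length = i0 := by omega
    have htake : ring.take i0 = p := by rw [hq2, ← hplen, List.take_left]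
    have hpre : ∀ x ∈ ring.take i0, junctions.contains x = false := by rw [htake]; exact hp
    have hdropi0 : ring.drop i0 = y :: q := by rw [hq2, ← hplen, List.drop_left]
    have h2 := List.drop_eq_getElem_cons hi0
    rw [hdropi0] at h2
    obtain ⟨hyy, hqq⟩ := List.cons_eq_cons.mp h2
    rw [← List.getD_eq_getElem ring 0 hi0] at hyy
    subst hyy
    have hq' : ring.drop (i0 + 1) = q := hqq.symm
    have hmain := pvMain junctions ring i0 hi0 hpre rest q i0 hi0 hy hq' hqidx
    -- B side
    unfold split_ring_at_junctions_alt
    rw [hfi]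
    simp only [PySem.List.slice_from_natCast, PySem.List.slice_to_natCast, hdropi0]
    have hB := pvFoldB junctions (q ++ ring.take i0) [] [ring.getD i0 0] (ring.getD i0 0)
    simp only [List.nil_append] at hB
    simp only [List.cons_append, PySem.List.pyGetD_zero_cons, PySem.List.slice_from_one,
      List.tail_cons]
    rw [hB, hmain]
    -- A side
    unfold split_ring_at_junctions
    simp only [Nat.cast_zero] at hji
    rw [hji]
    rw [if_neg (by simp)]
    simp only [PySem.List.foldl_append_singleton_eq_map, List.nil_append, List.length_map]
    rw [PySem.List.pyRange_zero_natCast, List.map_map]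
    apply List.ext_getElem
    · simp [pvAForm_length ring i0 (i0 :: rest) (by simp)]
    · intro k h1 h2
      have hk : k < (i0 :: rest).length := by simpa using h1
      have hn : 0 < (i0 :: rest).length := by simp
      have hm2 : (k + 1) % (i0 :: rest).length < (i0 :: rest).length := Nat.mod_lt _ hn
      simp only [List.getElem_map, Function.comp_apply, List.getElem_range]
      simp only [Int.ofNat_eq_natCast]
      have hmod : PySem.Int.mod ((k : Int) + 1) (((i0 :: rest).length : Nat) : Int) =
          (((k + 1) % (i0 :: rest).length : Nat) : Int) := by
        exact_mod_cast PySem.Int.mod_natCast (k + 1) (i0 :: rest).length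
      rw [hmod]
      simp only [PySem.List.pyGetD_natCast]
      rw [List.getD_eq_getElem _ 0 (by simpa using hk), List.getD_eq_getElem _ 0 (by simpa using hm2)]
      simp only [List.getElem_map]
      rw [pvAForm_getElem ring i0 (i0 :: rest) k hk (by simp)]
      by_cases hlt : k + 1 < (i0 :: rest).length
      · rw [dif_pos hlt]
        have hmlt : (k + 1) % (i0 :: rest).length = k + 1 := Nat.mod_eq_of_lt hlt
        have hab : (i0 :: rest)[k] < (i0 :: rest)[(k + 1) % (i0 :: rest).length]'hm2 := by
          apply List.pairwise_iff_getElem.mp hsort k _ hk hm2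
          omega
        rw [if_pos (by exact_mod_cast hab)]

        have hcast : ((((i0 :: rest)[(k + 1) % (i0 :: rest).length]'hm2 : Nat) : Int) + 1) =
            (((i0 :: rest)[(k + 1) % (i0 :: rest).length]'hm2 + 1 : Nat) : Int) := by push_cast; ring
        rw [hcast, PySem.List.slice_natCast]
        have hmlt' : (k + 1) % (rest.length + 1) = k + 1 := by simpa using hmlt
        simp [hmlt']
      · rw [dif_neg hlt]
        have hkn : k + 1 = (i0 :: rest).length := by omega
        have hm0 : (k + 1) % (i0 :: rest).length = 0 := by rw [hkn, Nat.mod_self]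
        have hle : i0 ≤ (i0 :: rest)[k] := by
          rcases Nat.eq_zero_or_pos k with rfl | hkpos
          · simp
          · exact le_of_lt (List.pairwise_iff_getElem.mp hsort 0 k (by omega) hk hkpos)
        have hcond : ¬ ((((i0 :: rest)[k] : Nat) : Int) <
            (((i0 :: rest)[(k + 1) % (i0 :: rest).length]'hm2 : Nat) : Int)) := by
          simp only [hm0]
          simp only [List.getElem_cons_zero]
          exact_mod_cast Nat.not_lt.mpr hle
        rw [if_neg hcond]
        have hcast : ((((i0 :: rest)[(k + 1) % (i0 :: rest).length]'hm2 : Nat) : Int) + 1) =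
            (((i0 :: rest)[(k + 1) % (i0 :: rest).length]'hm2 + 1 : Nat) : Int) := by push_cast; ring
        rw [hcast, PySem.List.slice_from_natCast, PySem.List.slice_to_natCast]
        have hm0' : (k + 1) % (rest.length + 1) = 0 := by simpa using hm0
        simp [hm0']

-- ===== VERDICT (by name: the statement is the Claim_ definition above) =====
theorem split_ring_at_junctions_spec : Claim_equal_split_ring_at_junctions := by
  intro ring junctions _ hpre
  exact split_ring_spec_aux ring junctions hpre
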